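-- pv_equiv track=rewrite | github.com/l-koehler/bridgetest | scripts/texture_maps.py | get_face_textures
-- ===== SOURCE A (Python) =====
-- face_keys = ["up", "down", "north", "south", "east", "west"]
--
-- key_aliases = {
--     "up": ["top"],
--     "down": ["bottom"],
--     "north": ["side"],
--     "south": ["side"],
--     "east": ["side"],
--     "west": ["side"]
-- }
--
-- def get_face_textures(texture_map):
--     # extract the textures for each face direction
--     has_particle = ("particle" in texture_map)
--     faces = {k: None for k in face_keys}
--     for key in face_keys:
--         texture = None
--         if key in texture_map:
--             texture = texture_map[key]
--             if texture[0] == "#":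
--                 texture = texture_map[texture[1::]]
--         else:
--             # try aliases
--             for key_alias in key_aliases[key]:
--                 if key_alias in texture_map:
--                     texture = texture_map[key_alias]
--                     if texture[0] == "#":
--                         texture = texture_map[texture[1::]]
--             # default to particle, then air
--             if has_particle and texture == None:
--                 texture = texture_map["particle"]
--                 if texture[0] == "#":
--                     texture = texture_map[texture[1::]]
--             elif texture == None:
--                 texture = "minecraft:block/air"
--         texture = texture.replace("minecraft:", "./")
--         faces[key] = texture+".png"
--     return faces
-- ===== SOURCE B (Python) =====
-- FACE_KEYS = ["up", "down", "north", "south", "east", "west"]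
--
-- # which faces each source key paints, weakest layer first, direct keys last
-- LAYERS = [
--     ("particle", ["up", "down", "north", "south", "east", "west"]),
--     ("top", ["up"]), ("bottom", ["down"]), ("side", ["north", "south", "east", "west"]),
--     ("up", ["up"]), ("down", ["down"]), ("north", ["north"]),
--     ("south", ["south"]), ("east", ["east"]), ("west", ["west"]),
-- ]
--
-- def get_face_textures(texture_map):
--     # pass 1: dereference every '#name' value once, up front
--     resolved = {k: (texture_map.get(v[1:], v) if v.startswith("#") else v)
--                 for k, v in texture_map.items()}
--     # pass 2: paint the faces in layers; a stronger source overwrites a weaker one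
--     faces = dict.fromkeys(FACE_KEYS, "minecraft:block/air")
--     for src, targets in LAYERS:
--         if src in resolved:
--             for f in targets:
--                 faces[f] = resolved[src]
--     return {f: t.replace("minecraft:", "./") + ".png" for f, t in faces.items()}
-- ===== Notes on version B (the rewrite author's own statement) =====
-- stated objective: alternative
-- what changed: A's per-face fallback chain (direct key, alias loop, particle, air, each with an inline '#'-resolution block) is replaced by two staged passes: first dereference every '#'-reference in the whole map once, then paint all faces with the default and overlay sources from weakest to strongest (particle, aliases, direct face keys), last write wins.
import Mathlib
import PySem

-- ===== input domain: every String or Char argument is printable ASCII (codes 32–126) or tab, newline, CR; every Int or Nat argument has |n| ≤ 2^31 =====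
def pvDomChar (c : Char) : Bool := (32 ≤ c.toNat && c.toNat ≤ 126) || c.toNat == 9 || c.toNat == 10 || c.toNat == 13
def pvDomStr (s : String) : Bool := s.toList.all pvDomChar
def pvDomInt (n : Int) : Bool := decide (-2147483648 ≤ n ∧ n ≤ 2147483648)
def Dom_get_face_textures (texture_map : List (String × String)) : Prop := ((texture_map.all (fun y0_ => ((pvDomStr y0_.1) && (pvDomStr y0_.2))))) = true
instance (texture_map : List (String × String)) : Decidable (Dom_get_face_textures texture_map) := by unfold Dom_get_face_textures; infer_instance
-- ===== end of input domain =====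

-- B replaces A's per-face fallback chain by two staged passes — dereference every '#'-reference
-- once, then paint the faces in layers (particle, aliases, direct keys), last write wins
-- (objective: alternative); equivalence is about the return value (A mutates nothing).

-- shared module constants (face_keys, key_aliases)
def pvFaceKeys : List String := ["up", "down", "north", "south", "east", "west"]

def pvKeyAliases : PySem.Dict String (List String) :=
  PySem.Dict.ofList [("up", ["top"]), ("down", ["bottom"]), ("north", ["side"]),
                     ("south", ["side"]), ("east", ["side"]), ("west", ["side"])]

-- ===== PORT A =====
-- 'if texture[0] == "#": texture = texture_map[texture[1::]]' (A repeats this block inline 3x);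
-- none = IndexError on texture[0] or KeyError on the reference, both excluded by Pre_
def pvResolveA (d : PySem.Dict String String) (texture : String) : Option String :=
  match PySem.Str.pyGet? texture 0 with
  | none => none
  | some c => if c = '#' then d.get? (PySem.Str.slice texture (some 1) none) else some texture

-- the body of A's 'for key in face_keys' loop, computing 'texture' (none = still Python's None)
def pvFaceA (d : PySem.Dict String String) (has_particle : Bool) (key : String)
    (aliases : List String) : Option String :=
  if d.contains key then
    (d.get? key).bind (pvResolveA d)
  else
    let texture : Option String :=
      aliases.foldl (fun texture ka =>
        if d.contains ka then (d.get? ka).bind (pvResolveA d) else texture) none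
    if has_particle && texture.isNone then (d.get? "particle").bind (pvResolveA d)
    else if texture.isNone then some "minecraft:block/air"
    else texture

def get_face_textures (texture_map : List (String × String)) : List (String × String) :=
  let d := PySem.Dict.ofList texture_map
  let has_particle := d.contains "particle"          -- ("particle" in texture_map)
  let faces0 : PySem.Dict String (Option String) :=  -- faces = {k: None for k in face_keys}
    pvFaceKeys.foldl (fun f k => f.insert k none) PySem.Dict.empty
  let faces :=
    pvFaceKeys.foldl (fun f key =>
      f.insert key ((pvFaceA d has_particle key (pvKeyAliases.getD key [])).map
        (fun t => PySem.Str.replace t "minecraft:" "./" ++ ".png"))) faces0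
  faces.items.map (fun p => (p.1, p.2.getD ""))
  -- .getD "" is only the Option→String type adapter: the loop assigned a string to every face

-- ===== PORT B =====
-- LAYERS: which faces each source key paints, weakest layer first, direct keys last
def pvLayers : List (String × List String) :=
  [("particle", ["up", "down", "north", "south", "east", "west"]),
   ("top", ["up"]), ("bottom", ["down"]), ("side", ["north", "south", "east", "west"]),
   ("up", ["up"]), ("down", ["down"]), ("north", ["north"]),
   ("south", ["south"]), ("east", ["east"]), ("west", ["west"])]

-- texture_map.get(v[1:], v) if v.startswith('#') else v
def pvDeref (d : PySem.Dict String String) (v : String) : String :=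
  if PySem.Str.startswith v "#" then (d.get? (PySem.Str.slice v (some 1) none)).getD v else v

-- the body of B's painting loop: 'if src in resolved: for f in targets: faces[f] = resolved[src]'
def pvPaintStep (resolved : PySem.Dict String String) (f : PySem.Dict String String)
    (layer : String × List String) : PySem.Dict String String :=
  match resolved.get? layer.1 with
  | some v => layer.2.foldl (fun f2 face => f2.insert face v) f
  | none => f

def get_face_textures_alt (texture_map : List (String × String)) : List (String × String) :=
  let d := PySem.Dict.ofList texture_map
  -- resolved = {k: (deref) for k, v in texture_map.items()}
  let resolved := PySem.Dict.ofList (d.items.map (fun p => (p.1, pvDeref d p.2)))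
  -- faces = dict.fromkeys(FACE_KEYS, "minecraft:block/air")
  let faces0 : PySem.Dict String String :=
    pvFaceKeys.foldl (fun f k => f.insert k "minecraft:block/air") PySem.Dict.empty
  let faces := pvLayers.foldl (pvPaintStep resolved) faces0
  faces.items.map (fun p => (p.1, PySem.Str.replace p.2 "minecraft:" "./" ++ ".png"))

-- ===== PRECONDITION & SPEC =====
-- the candidate sources A tries for each face, in A's order
def pvCandLists : List (List String) :=
  [["up", "top", "particle"], ["down", "bottom", "particle"], ["north", "side", "particle"],
   ["south", "side", "particle"], ["east", "side", "particle"], ["west", "side", "particle"]]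

-- the first candidate present in the map must have a non-empty value whose '#'-reference (if any) resolves
def pvGoodFirst (d : PySem.Dict String String) (cs : List String) : Bool :=
  match cs.find? (fun c => (d.get? c).isSome) with
  | none => true
  | some c =>
    match d.get? c with
    | none => true
    | some v => v != "" &&
        (!(PySem.Str.startswith v "#") || (d.get? (PySem.Str.slice v (some 1) none)).isSome)

-- Pre_ excludes exactly the inputs on which A raises: a used texture value that is the empty
-- string (IndexError on texture[0]) or a dangling '#'-reference (KeyError); A returns on all others.
def Pre_get_face_textures (texture_map : List (String × String)) : Prop :=
  pvCandLists.all (pvGoodFirst (PySem.Dict.ofList texture_map)) = true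
instance (texture_map : List (String × String)) : Decidable (Pre_get_face_textures texture_map) := by
  unfold Pre_get_face_textures; infer_instance

def pvWitness_get_face_textures : (List (String × String)) :=
  [("up", "minecraft:block/dirt"), ("side", "#up"), ("particle", "x")]

def Spec_get_face_textures (texture_map : List (String × String)) (out : List (String × String)) : Prop := out = get_face_textures_alt texture_map
instance (texture_map : List (String × String)) (out : List (String × String)) : Decidable (Spec_get_face_textures texture_map out) := by unfold Spec_get_face_textures; infer_instance

-- ===== CLAIM (what is proved, stated in full; the proofs are below) =====
def Claim_equal_get_face_textures : Prop := ∀ (texture_map : List (String × String)), Dom_get_face_textures texture_map → Pre_get_face_textures texture_map → Spec_get_face_textures texture_map (get_face_textures texture_map)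

-- ===== LEMMAS AND PROOFS =====

-- under Pre_'s conditions A's inline resolution block returns B's dereferenced value
theorem pvResolve_eq (d : PySem.Dict String String) (v : String) (h1 : v ≠ "")
    (h2 : PySem.Str.startswith v "#" = true →
      (d.get? (PySem.Str.slice v (some 1) none)).isSome = true) :
    pvResolveA d v = some (pvDeref d v) := by
  obtain ⟨c, cs, hc⟩ :=
    List.exists_cons_of_ne_nil (fun hh => h1 (String.toList_eq_nil_iff.mp hh))
  have hget : PySem.Str.pyGet? v 0 = some c := by simp [pysem, hc]
  have hsw : PySem.Str.startswith v "#" = (c == '#') := by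
    simp [pysem, hc, PySem.Chars.startswith, List.isPrefixOf, eq_comm]
  unfold pvResolveA pvDeref
  rw [hget, hsw]
  by_cases hhash : c = '#'
  · subst hhash
    obtain ⟨x, hx⟩ := Option.isSome_iff_exists.mp (h2 (by rw [hsw]; simp))
    simp [hx]
  · simp [hhash]

-- rebuilding a dict from its items changes nothing (keys are already unique)
theorem pv_ofList_items (d : PySem.Dict String String) (h : d.keys.Nodup) :
    PySem.Dict.ofList d.items = d := by
  apply PySem.Dict.ext
  have := PySem.Dict.items_foldl_insert_fresh (l := d.items) (k := Prod.fst) (v := Prod.snd)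
      (d := (PySem.Dict.empty : PySem.Dict String String))
      (by intro a _; simp [pysem]) (by simpa [PySem.Dict.keys] using h)
  simpa [PySem.Dict.ofList] using this

-- a dict comprehension mapping the values: lookups commute with the value map
theorem pv_get_ofList_map (g : String → String) (l : List (String × String)) (x : String) :
    (PySem.Dict.ofList (l.map (fun p => (p.1, g p.2)))).get? x
      = ((PySem.Dict.ofList l).get? x).map g := by
  induction l using List.reverseRecOn with
  | nil => rfl
  | append_singleton l p ih =>
    have h1 : PySem.Dict.ofList ((l ++ [p]).map (fun p => (p.1, g p.2)))
        = (PySem.Dict.ofList (l.map (fun p => (p.1, g p.2)))).insert p.1 (g p.2) := by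
      show PySem.Dict.update _ _ = _
      rw [List.map_append]
      show List.foldl _ _ _ = _
      rw [List.foldl_append]; rfl
    have h2 : PySem.Dict.ofList (l ++ [p]) = (PySem.Dict.ofList l).insert p.1 p.2 := by
      show PySem.Dict.update _ _ = _
      show List.foldl _ _ _ = _
      rw [List.foldl_append]; rfl
    rw [h1, h2, PySem.Dict.get?_insert, PySem.Dict.get?_insert]
    split_ifs <;> simp [ih]

-- B's pass 1 as a function: resolved[x] = deref(texture_map[x])
theorem pvResolved_get (d : PySem.Dict String String) (hnd : d.keys.Nodup) (x : String) :
    (PySem.Dict.ofList (d.items.map (fun p => (p.1, pvDeref d p.2)))).get? x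
      = (d.get? x).map (pvDeref d) := by
  rw [pv_get_ofList_map, pv_ofList_items d hnd]

-- painting a set of faces of the dict {face: F face} overwrites exactly those entries
theorem pvPaint_items : ∀ (targets : List String) (f : PySem.Dict String String)
    (F : String → String), f.items = pvFaceKeys.map (fun k => (k, F k)) →
    (∀ x ∈ targets, x ∈ pvFaceKeys) → ∀ (v : String),
    (targets.foldl (fun f2 face => f2.insert face v) f).items
      = pvFaceKeys.map (fun k => (k, if k ∈ targets then v else F k))
  | [], f, F, hf, _, v => by simp [hf]
  | t :: ts, f, F, hf, hsub, v => by
    have hkeys : f.keys = pvFaceKeys := by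
      simp [PySem.Dict.keys, hf, Function.comp_def]
    have hct : f.contains t = true := by
      rw [PySem.Dict.contains_eq_decide_mem_keys, hkeys]
      simpa using hsub t (by simp)
    have hins : (f.insert t v).items
        = pvFaceKeys.map (fun k => (k, if k = t then v else F k)) := by
      rw [PySem.Dict.items_insert, hf]
      simp only [hct, if_true, List.map_map]
      apply List.map_congr_left; intro k _
      by_cases h : k = t <;> simp [h]
    have hrec := pvPaint_items ts (f.insert t v) (fun k => if k = t then v else F k) hins
      (fun x hx => hsub x (List.mem_cons_of_mem _ hx)) v
    rw [List.foldl_cons, hrec]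
    apply List.map_congr_left; intro k _
    by_cases h1 : k = t <;> by_cases h2 : k ∈ ts <;> simp [h1, h2]

-- the per-face effect of one painting layer
def pvLayerF (d : PySem.Dict String String) (src : String) (targets : List String)
    (F : String → String) (k : String) : String :=
  if k ∈ targets then
    match d.get? src with
    | some v => pvDeref d v
    | none => F k
  else F k

theorem pvLayer_items (d : PySem.Dict String String) (hnd : d.keys.Nodup)
    (f : PySem.Dict String String) (F : String → String)
    (hf : f.items = pvFaceKeys.map (fun k => (k, F k)))
    (src : String) (targets : List String) (hsub : ∀ x ∈ targets, x ∈ pvFaceKeys) :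
    (pvPaintStep (PySem.Dict.ofList (d.items.map (fun p => (p.1, pvDeref d p.2)))) f
        (src, targets)).items
      = pvFaceKeys.map (fun k => (k, pvLayerF d src targets F k)) := by
  unfold pvPaintStep
  rw [pvResolved_get d hnd]
  cases h : d.get? src with
  | none =>
    simp only [Option.map_none]
    rw [hf]
    apply List.map_congr_left; intro k _
    by_cases hk : k ∈ targets <;> simp [pvLayerF, hk, h]
  | some v =>
    simp only [Option.map_some]
    rw [pvPaint_items targets f F hf hsub (pvDeref d v)]
    apply List.map_congr_left; intro k _
    by_cases hk : k ∈ targets <;> simp [pvLayerF, hk, h]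

-- first present candidate, dereferenced (what the layered painting leaves on a face)
def pvPick (d : PySem.Dict String String) : List String → String
  | [] => "minecraft:block/air"
  | c :: rest =>
    match d.get? c with
    | some v => pvDeref d v
    | none => pvPick d rest

theorem pvFace_eq (d : PySem.Dict String String) (k a : String)
    (h : pvGoodFirst d [k, a, "particle"] = true) :
    pvFaceA d (d.contains "particle") k [a] = some (pvPick d [k, a, "particle"]) := by
  have hlit : ("#".toList) = ['#'] := by decide
  have hres : ∀ v : String, v ≠ "" →
      (PySem.Chars.startswith v.toList ['#'] = false ∨
        (d.get? (PySem.Str.slice v (some 1) none)).isSome = true) →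
      pvResolveA d v = some (pvDeref d v) := by
    intro v hne hor
    refine pvResolve_eq d v hne ?_
    intro hsw
    rcases hor with h' | h'
    · exfalso
      have hsw' : PySem.Chars.startswith v.toList ['#'] = true := by
        simpa [pysem, hlit] using hsw
      simp [hsw'] at h'
    · exact h'
  cases hk : d.get? k with
  | some v =>
    have hck : d.contains k = true := by
      rw [PySem.Dict.contains_eq_isSome_get?, hk]; rfl
    have hv := by simpa [pvGoodFirst, List.find?, hk] using h
    simp [pvFaceA, pvPick, hck, hk, hres v hv.1 hv.2]
  | none =>
    have hck : d.contains k = false := by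
      rw [PySem.Dict.contains_eq_isSome_get?, hk]; rfl
    cases ha : d.get? a with
    | some w =>
      have hca : d.contains a = true := by
        rw [PySem.Dict.contains_eq_isSome_get?, ha]; rfl
      have hw := by simpa [pvGoodFirst, List.find?, hk, ha] using h
      simp [pvFaceA, pvPick, hck, hca, hk, ha, hres w hw.1 hw.2]
    | none =>
      have hca : d.contains a = false := by
        rw [PySem.Dict.contains_eq_isSome_get?, ha]; rfl
      cases hp : d.get? "particle" with
      | some u =>
        have hcp : d.contains "particle" = true := by
          rw [PySem.Dict.contains_eq_isSome_get?, hp]; rfl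
        have hu := by simpa [pvGoodFirst, List.find?, hk, ha, hp] using h
        simp [pvFaceA, pvPick, hck, hca, hcp, hk, ha, hp, hres u hu.1 hu.2]
      | none =>
        have hcp : d.contains "particle" = false := by
          rw [PySem.Dict.contains_eq_isSome_get?, hp]; rfl
        simp [pvFaceA, pvPick, hck, hca, hcp, hk, ha, hp]

-- A's faces dict: initialised with all six literal keys, then each overwritten in order
theorem pvFold_items (g : String → Option String) :
    (pvFaceKeys.foldl (fun f k => f.insert k (g k))
      (pvFaceKeys.foldl (fun f k => f.insert k (none : Option String)) PySem.Dict.empty)).items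
    = pvFaceKeys.map (fun k => (k, g k)) := by
  rfl

-- ===== VERDICT (by name: the statement is the Claim_ definition above) =====
theorem get_face_textures_spec : Claim_equal_get_face_textures := by
  intro tm _ hpre
  unfold Pre_get_face_textures at hpre
  simp only [pvCandLists, List.all, Bool.and_eq_true] at hpre
  obtain ⟨g1, g2, g3, g4, g5, g6, -⟩ := hpre
  unfold Spec_get_face_textures get_face_textures get_face_textures_alt
  dsimp only
  rw [pvFold_items]
  have hnd : (PySem.Dict.ofList tm).keys.Nodup := PySem.Dict.nodup_keys_ofList tm
  set d := PySem.Dict.ofList tm with hd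
  -- B's painting loop, one layer at a time
  have h0 : (pvFaceKeys.foldl (fun f k => f.insert k "minecraft:block/air")
      PySem.Dict.empty).items
      = pvFaceKeys.map (fun k => (k, (fun _ => "minecraft:block/air") k)) := rfl
  have h1 := pvLayer_items d hnd _ _ h0 "particle"
    ["up", "down", "north", "south", "east", "west"] (by decide)
  have h2 := pvLayer_items d hnd _ _ h1 "top" ["up"] (by decide)
  have h3 := pvLayer_items d hnd _ _ h2 "bottom" ["down"] (by decide)
  have h4 := pvLayer_items d hnd _ _ h3 "side" ["north", "south", "east", "west"] (by decide)
  have h5 := pvLayer_items d hnd _ _ h4 "up" ["up"] (by decide)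
  have h6 := pvLayer_items d hnd _ _ h5 "down" ["down"] (by decide)
  have h7 := pvLayer_items d hnd _ _ h6 "north" ["north"] (by decide)
  have h8 := pvLayer_items d hnd _ _ h7 "south" ["south"] (by decide)
  have h9 := pvLayer_items d hnd _ _ h8 "east" ["east"] (by decide)
  have h10 := pvLayer_items d hnd _ _ h9 "west" ["west"] (by decide)
  simp only [pvLayers, List.foldl]
  rw [h10, List.map_map, List.map_map]
  apply List.map_congr_left
  intro k hk
  fin_cases hk <;>
    simp only [Function.comp_apply, pvLayerF, List.mem_cons, List.not_mem_nil,
      or_false, if_true]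
  · rw [show pvKeyAliases.getD "up" [] = ["top"] from rfl, pvFace_eq _ _ _ g1]
    cases h1 : d.get? "up" <;> cases h2 : d.get? "top" <;> cases h3 : d.get? "particle" <;>
      simp [pvPick, h1, h2, h3]
  · rw [show pvKeyAliases.getD "down" [] = ["bottom"] from rfl, pvFace_eq _ _ _ g2]
    cases h1 : d.get? "down" <;> cases h2 : d.get? "bottom" <;> cases h3 : d.get? "particle" <;>
      simp [pvPick, h1, h2, h3]
  · rw [show pvKeyAliases.getD "north" [] = ["side"] from rfl, pvFace_eq _ _ _ g3]
    cases h1 : d.get? "north" <;> cases h2 : d.get? "side" <;> cases h3 : d.get? "particle" <;>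
      simp [pvPick, h1, h2, h3]
  · rw [show pvKeyAliases.getD "south" [] = ["side"] from rfl, pvFace_eq _ _ _ g4]
    cases h1 : d.get? "south" <;> cases h2 : d.get? "side" <;> cases h3 : d.get? "particle" <;>
      simp [pvPick, h1, h2, h3]
  · rw [show pvKeyAliases.getD "east" [] = ["side"] from rfl, pvFace_eq _ _ _ g5]
    cases h1 : d.get? "east" <;> cases h2 : d.get? "side" <;> cases h3 : d.get? "particle" <;>
      simp [pvPick, h1, h2, h3]
  · rw [show pvKeyAliases.getD "west" [] = ["side"] from rfl, pvFace_eq _ _ _ g6]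
    cases h1 : d.get? "west" <;> cases h2 : d.get? "side" <;> cases h3 : d.get? "particle" <;>
      simp [pvPick, h1, h2, h3]
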